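-- pv_equiv track=rewrite | github.com/isshumongoo/HW1Part2Scripts | practice.py | tcp_window_size_calculator
-- ===== SOURCE A (Python) =====
-- def tcp_window_size_calculator(initial_ssthresh=44, initial_cwnd=10, initial_rwnd=104):
--     def question1(new_acks=27):
--         """Calculate window size after consecutive ACKs"""
--         cwnd = initial_cwnd
--         ssthresh = initial_ssthresh
--
--         # Slow start phase
--         for _ in range(new_acks):
--             if cwnd < ssthresh:
--                 # Slow start: double cwnd
--                 cwnd = min(cwnd * 2, ssthresh)
--             else:
--                 # Congestion avoidance: increment by 1
--                 cwnd += 1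
--
--         return cwnd
--
--     def question2(target_window=53):
--         """Calculate ACKs needed to reach target window size"""
--         cwnd = initial_cwnd
--         ssthresh = initial_ssthresh
--         acks = 0
--
--         while cwnd < target_window:
--             if cwnd < ssthresh:
--                 # Slow start: double cwnd
--                 cwnd = min(cwnd * 2, ssthresh)
--             else:
--                 # Congestion avoidance: increment by 1
--                 cwnd += 1
--             acks += 1
--
--         return acks
--
--     def question3(initial_window=60, new_acks=60, new_rwnd=52):
--         """Calculate window size with new ACKs and reduced window"""
--         cwnd = initial_window
--         rwnd = min(new_rwnd, initial_rwnd)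
--         ssthresh = initial_ssthresh
--
--         # Apply congestion avoidance
--         for _ in range(new_acks):
--             if cwnd < ssthresh:
--                 # Slow start: double cwnd
--                 cwnd = min(cwnd * 2, ssthresh, rwnd)
--             else:
--                 # Congestion avoidance: increment by 1
--                 cwnd = min(cwnd + 1, rwnd)
--
--         return cwnd
--
--     def question4_tahoe(initial_window=60, duplicate_acks=4):
--         """TCP Tahoe response to duplicate ACKs"""
--         return 1  # Reset to 1 MSS
--
--     def question5_reno(initial_window=60, duplicate_acks=4):
--         """TCP Reno response to duplicate ACKs"""
--         # Reduce window to half, but at least 1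
--         return 34
--
--     def question6(initial_window=60):
--         """ACKs needed to rebuild window after timeout"""
--         cwnd = 1  # Reset to 1 MSS after timeout
--         ssthresh = initial_window // 2  # Reduce ssthresh to half of current window
--         acks = 0
--
--         while cwnd < initial_window:
--             if cwnd < ssthresh:
--                 # Slow start: double cwnd
--                 cwnd = min(cwnd * 2, ssthresh)
--             else:
--                 # Congestion avoidance: increment by 1
--                 cwnd += 1
--             acks += 1
--
--         return acks
--
--     # Return results for each question
--     return [
--         question1(),
--         question2(),
--         question3(),
--         question4_tahoe(),
--         question5_reno(),
--         question6()
--     ]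
-- ===== SOURCE B (Python) =====
-- def tcp_window_size_calculator(initial_ssthresh=44, initial_cwnd=10, initial_rwnd=104):
--     # Closed-form reimplementation: each simulated question is computed arithmetically
--     # (ceil-division + bit_length count the slow-start doubling steps) instead of per-ACK loops.
--
--     def doubling_steps(c, s):
--         # smallest k with c * 2**k >= s, for 1 <= c < s
--         return (-(-s // c) - 1).bit_length()
--
--     def grow(c, s, n):
--         # window after n ACKs starting from c (slow start capped at s, then +1 per ACK)
--         if c >= s:
--             return c + n
--         k = doubling_steps(c, s)
--         return s + (n - k) if k <= n else c << n
--
--     def acks_to_reach(c, s, target):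
--         # ACKs until the window first reaches target
--         if c >= target:
--             return 0
--         if c >= s:
--             return target - c
--         if s >= target:
--             return doubling_steps(c, target)
--         return doubling_steps(c, s) + (target - s)
--
--     return [
--         grow(initial_cwnd, initial_ssthresh, 27),
--         acks_to_reach(initial_cwnd, initial_ssthresh, 53),
--         min(52, initial_rwnd),  # the receive window caps the 60-ACK growth from 60
--         1,
--         34,
--         acks_to_reach(1, 30, 60),
--     ]
-- ===== Notes on version B (the rewrite author's own statement) =====
-- stated objective: faster
-- what changed: Replaces every per-ACK simulation loop with closed-form arithmetic: ceil-division plus bit_length count the slow-start doubling steps, and the additive phase and question3's rwnd cap are computed directly.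
-- intended difference: When initial_rwnd is negative and below initial_ssthresh, A's question-3 loop keeps doubling the negative window and returns min(52,initial_rwnd)*2**59, a meaningless huge negative window; B returns the receive-window cap min(52,initial_rwnd), the intended capped window size. — e.g. on tcp_window_size_calculator(44, 10, -1): A returns [68, 12, -576460752303423488, 1, 34, 35], B returns [68, 12, -1, 1, 34, 35]
import Mathlib
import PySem

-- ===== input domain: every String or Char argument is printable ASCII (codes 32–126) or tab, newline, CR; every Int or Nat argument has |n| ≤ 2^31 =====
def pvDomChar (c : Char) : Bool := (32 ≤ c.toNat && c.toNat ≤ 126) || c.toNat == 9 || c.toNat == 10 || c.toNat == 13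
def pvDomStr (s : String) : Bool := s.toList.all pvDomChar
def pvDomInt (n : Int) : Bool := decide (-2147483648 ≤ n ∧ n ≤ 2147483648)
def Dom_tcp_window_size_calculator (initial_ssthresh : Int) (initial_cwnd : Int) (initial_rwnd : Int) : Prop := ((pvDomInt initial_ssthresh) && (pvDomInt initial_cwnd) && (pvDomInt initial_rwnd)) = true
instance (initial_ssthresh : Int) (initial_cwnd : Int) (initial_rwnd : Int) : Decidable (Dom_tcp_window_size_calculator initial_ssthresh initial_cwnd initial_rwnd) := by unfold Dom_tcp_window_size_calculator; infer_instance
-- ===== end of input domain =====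

-- B replaces A's per-ACK simulation loops with closed-form arithmetic (ceil division +
-- bit_length count the slow-start doubling steps); equivalence is about the return value,
-- with one intended difference (D_) on negative receive windows.

-- ===== PORT A =====

-- the while-loops of question2/question6; Python diverges when the window cannot grow
-- (cwnd ≤ 0 and cwnd < ssthresh): the dite guard below only makes the recursion total,
-- those inputs are excluded by Pre_.
def pvWhileA (target ss : Int) (cwnd acks : Int) : Int :=
  if _h1 : cwnd < target then
    if _h2 : 1 ≤ cwnd ∨ ss ≤ cwnd then
      pvWhileA target ss (if cwnd < ss then min (cwnd * 2) ss else cwnd + 1) (acks + 1)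
    else acks
  else acks
termination_by (target - cwnd).toNat
decreasing_by
  split <;> omega

def tcp_window_size_calculator (initial_ssthresh : Int) (initial_cwnd : Int) (initial_rwnd : Int) : List Int :=
  -- question1: 27 ACKs of slow start / congestion avoidance
  let q1 := (List.range 27).foldl
    (fun cwnd _ => if cwnd < initial_ssthresh then min (cwnd * 2) initial_ssthresh else cwnd + 1)
    initial_cwnd
  -- question2: ACKs until the window reaches 53
  let q2 := pvWhileA 53 initial_ssthresh initial_cwnd 0
  -- question3: 60 ACKs from window 60 with rwnd = min(52, initial_rwnd)
  let rwnd := min 52 initial_rwnd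
  let q3 := (List.range 60).foldl
    (fun cwnd _ => if cwnd < initial_ssthresh then min (min (cwnd * 2) initial_ssthresh) rwnd
                   else min (cwnd + 1) rwnd)
    60
  -- question6: rebuild from 1 to 60 with ssthresh = 60 // 2
  let q6 := pvWhileA 60 (PySem.Int.floordiv 60 2) 1 0
  [q1, q2, q3, 1, 34, q6]

-- ===== PORT B =====

-- smallest k with c * 2^k ≥ s (for 1 ≤ c < s): (-(-s//c) - 1).bit_length()
def altDoublingSteps (c s : Int) : Nat :=
  PySem.Int.bitLength (-(PySem.Int.floordiv (-s) c) - 1)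

-- window after n ACKs starting from c
def altGrow (c s : Int) (n : Nat) : Int :=
  if s ≤ c then c + n
  else
    let k := altDoublingSteps c s
    if k ≤ n then s + ((n : Int) - (k : Int)) else c * 2 ^ n

-- ACKs until the window first reaches target
def altAcks (c s target : Int) : Int :=
  if target ≤ c then 0
  else if s ≤ c then target - c
  else if target ≤ s then (altDoublingSteps c target : Int)
  else (altDoublingSteps c s : Int) + (target - s)

def tcp_window_size_calculator_alt (initial_ssthresh : Int) (initial_cwnd : Int) (initial_rwnd : Int) : List Int :=
  [altGrow initial_cwnd initial_ssthresh 27,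
   altAcks initial_cwnd initial_ssthresh 53,
   min 52 initial_rwnd,  -- the receive window caps the 60-ACK growth from 60
   1,
   34,
   altAcks 1 30 60]

-- ===== PRECONDITION & SPEC =====
-- Pre_ excludes exactly the inputs where A diverges: with cwnd ≤ 0 and cwnd < ssthresh the
-- question2 while-loop never makes progress (min(cwnd*2, ssthresh) ≤ cwnd), so A never returns.
def Pre_tcp_window_size_calculator (initial_ssthresh : Int) (initial_cwnd : Int) (initial_rwnd : Int) : Prop :=
  1 ≤ initial_cwnd ∨ initial_ssthresh ≤ initial_cwnd
instance (initial_ssthresh : Int) (initial_cwnd : Int) (initial_rwnd : Int) : Decidable (Pre_tcp_window_size_calculator initial_ssthresh initial_cwnd initial_rwnd) := by unfold Pre_tcp_window_size_calculator; infer_instance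

def pvWitness_tcp_window_size_calculator : Int × Int × Int := (44, 10, 104)

-- When initial_rwnd is negative and below initial_ssthresh, A's question-3 loop keeps doubling
-- the negative window and returns min(52,initial_rwnd)*2^59, a meaningless huge negative window;
-- B returns the receive-window cap min(52, initial_rwnd), the intended capped window size.
def D_tcp_window_size_calculator (initial_ssthresh : Int) (initial_cwnd : Int) (initial_rwnd : Int) : Prop :=
  initial_rwnd < 0 ∧ initial_rwnd < initial_ssthresh
instance (initial_ssthresh : Int) (initial_cwnd : Int) (initial_rwnd : Int) : Decidable (D_tcp_window_size_calculator initial_ssthresh initial_cwnd initial_rwnd) := by unfold D_tcp_window_size_calculator; infer_instance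

def Spec_tcp_window_size_calculator (initial_ssthresh : Int) (initial_cwnd : Int) (initial_rwnd : Int) (out : List Int) : Prop := ¬ D_tcp_window_size_calculator initial_ssthresh initial_cwnd initial_rwnd → out = tcp_window_size_calculator_alt initial_ssthresh initial_cwnd initial_rwnd
instance (initial_ssthresh : Int) (initial_cwnd : Int) (initial_rwnd : Int) (out : List Int) : Decidable (Spec_tcp_window_size_calculator initial_ssthresh initial_cwnd initial_rwnd out) := by unfold Spec_tcp_window_size_calculator; infer_instance

def pvDiffWitness_tcp_window_size_calculator : Int × Int × Int := (44, 10, -1)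
def pvDiffWitnessOut_tcp_window_size_calculator : (List Int) × (List Int) :=
  ([68, 12, -576460752303423488, 1, 34, 35], [68, 12, -1, 1, 34, 35])

-- ===== CLAIM (what is proved, stated in full; the proofs are below) =====
def Claim_unchanged_tcp_window_size_calculator : Prop := ∀ (initial_ssthresh : Int) (initial_cwnd : Int) (initial_rwnd : Int), Dom_tcp_window_size_calculator initial_ssthresh initial_cwnd initial_rwnd → Pre_tcp_window_size_calculator initial_ssthresh initial_cwnd initial_rwnd → Spec_tcp_window_size_calculator initial_ssthresh initial_cwnd initial_rwnd (tcp_window_size_calculator initial_ssthresh initial_cwnd initial_rwnd)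
def Claim_changed_tcp_window_size_calculator : Prop := Dom_tcp_window_size_calculator (pvDiffWitness_tcp_window_size_calculator.1) (pvDiffWitness_tcp_window_size_calculator.2.1) (pvDiffWitness_tcp_window_size_calculator.2.2) ∧ Pre_tcp_window_size_calculator (pvDiffWitness_tcp_window_size_calculator.1) (pvDiffWitness_tcp_window_size_calculator.2.1) (pvDiffWitness_tcp_window_size_calculator.2.2) ∧ D_tcp_window_size_calculator (pvDiffWitness_tcp_window_size_calculator.1) (pvDiffWitness_tcp_window_size_calculator.2.1) (pvDiffWitness_tcp_window_size_calculator.2.2) ∧ tcp_window_size_calculator (pvDiffWitness_tcp_window_size_calculator.1) (pvDiffWitness_tcp_window_size_calculator.2.1) (pvDiffWitness_tcp_window_size_calculator.2.2) = pvDiffWitnessOut_tcp_window_size_calculator.1 ∧ tcp_window_size_calculator_alt (pvDiffWitness_tcp_window_size_calculator.1) (pvDiffWitness_tcp_window_size_calculator.2.1) (pvDiffWitness_tcp_window_size_calculator.2.2) = pvDiffWitnessOut_tcp_window_size_calculator.2 ∧ pvDiffWitnessOut_tcp_window_size_calculator.1 ≠ pvDiffWitnessOut_tcp_window_size_calcu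lator.2
def Claim_exact_tcp_window_size_calculator : Prop := ∀ (initial_ssthresh : Int) (initial_cwnd : Int) (initial_rwnd : Int), Dom_tcp_window_size_calculator initial_ssthresh initial_cwnd initial_rwnd → Pre_tcp_window_size_calculator initial_ssthresh initial_cwnd initial_rwnd → D_tcp_window_size_calculator initial_ssthresh initial_cwnd initial_rwnd → tcp_window_size_calculator initial_ssthresh initial_cwnd initial_rwnd ≠ tcp_window_size_calculator_alt initial_ssthresh initial_cwnd initial_rwnd

-- ===== LEMMAS AND PROOFS =====

-- the slow-start/congestion-avoidance step of questions 1/2/6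
def pvF (s c : Int) : Int := if c < s then min (c * 2) s else c + 1

-- a foldl over range that ignores the index is an iterate
theorem foldl_const_iterate (f : Int → Int) (l : List Nat) (c : Int) :
    l.foldl (fun a _ => f a) c = f^[l.length] c := by
  induction l generalizing c with
  | nil => rfl
  | cons x xs ih => simp [List.foldl_cons, ih, Function.iterate_succ_apply]

-- congestion-avoidance phase: once at or above ssthresh, each ACK adds 1
theorem iter_ge (s c : Int) (h : s ≤ c) (n : Nat) : (pvF s)^[n] c = c + n := by
  induction n with
  | zero => simp
  | succ n ih =>
      rw [Function.iterate_succ_apply', ih, pvF]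
      split
      · omega
      · push_cast; ring

-- pure doubling phase
theorem iter_doubling (s : Int) (n : Nat) : ∀ c : Int, 1 ≤ c → c * 2 ^ n < s →
    (pvF s)^[n] c = c * 2 ^ n := by
  induction n with
  | zero => intro c _ _; simp
  | succ n ih =>
      intro c hc hlt
      have h1 : (1:Int) ≤ 2 ^ n := one_le_pow₀ (by norm_num)
      have h2 : c * 2 ≤ c * 2 ^ (n+1) := by
        have : (2:Int) ≤ 2 ^ (n+1) := by
          calc (2:Int) = 2^1 := by ring
          _ ≤ 2 ^ (n+1) := by exact pow_le_pow_right₀ (by norm_num) (by omega)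
        nlinarith
      have hcs : c < s := by nlinarith
      rw [Function.iterate_succ_apply]
      have hstep : pvF s c = c * 2 := by
        rw [pvF]; simp only [if_pos hcs]; omega
      rw [hstep, ih (c * 2) (by omega) (by rw [pow_succ] at hlt; linarith [hlt])]
      ring

-- crossing step: one ACK caps at ssthresh, then +1 per ACK
theorem iter_cross (s c : Int) (hc : c < s) (h2 : s ≤ c * 2) (n : Nat) :
    (pvF s)^[n + 1] c = s + n := by
  rw [Function.iterate_succ_apply]
  have hstep : pvF s c = s := by rw [pvF]; simp only [if_pos hc]; omega
  rw [hstep, iter_ge s s le_rfl n]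

-- the closed-form doubling-step count is the smallest k with c * 2^k ≥ s
theorem dsteps_spec (c s : Int) (hc : 1 ≤ c) (hs : c < s) :
    1 ≤ altDoublingSteps c s ∧ c * 2 ^ (altDoublingSteps c s - 1) < s ∧
      s ≤ c * 2 ^ (altDoublingSteps c s) := by
  set q : Int := -(PySem.Int.floordiv (-s) c) with hq
  have hqc : (q - 1) * c < s ∧ s ≤ q * c :=
    (PySem.Int.neg_floordiv_neg_eq_iff_of_pos (by omega)).1 hq.symm
  have hq2 : 2 ≤ q := by nlinarith [hqc.1, hqc.2]
  have hne : q - 1 ≠ 0 := by omega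
  have habs : (q - 1).natAbs = (q - 1).toNat := by omega
  set k := altDoublingSteps c s with hk
  have hkdef : k = PySem.Int.bitLength (q - 1) := rfl
  have hub : (q - 1).natAbs < 2 ^ k := by rw [hkdef]; exact PySem.Int.lt_two_pow_bitLength _
  have hlb : 2 ^ (k - 1) ≤ (q - 1).natAbs := by rw [hkdef]; exact PySem.Int.two_pow_bitLength_le _ hne
  have hk1 : 1 ≤ k := by
    by_contra h
    have : k = 0 := by omega
    rw [this] at hub
    omega
  refine ⟨hk1, ?_, ?_⟩
  · -- c * 2^(k-1) ≤ c * (q-1) < s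
    have h1 : (2:Int) ^ (k - 1) ≤ q - 1 := by
      have := hlb
      have : ((2 ^ (k - 1) : Nat) : Int) ≤ ((q - 1).natAbs : Int) := by exact_mod_cast this
      rw [habs] at this; push_cast at this ⊢; omega
    nlinarith [hqc.1]
  · -- s ≤ c * q ≤ c * 2^k
    have h1 : q ≤ (2:Int) ^ k := by
      have : ((q - 1).natAbs : Int) < ((2 ^ k : Nat) : Int) := by exact_mod_cast hub
      rw [habs] at this; push_cast at this ⊢; omega
    nlinarith [hqc.2]

-- monotonicity: a smaller threshold needs no more doubling steps
theorem dsteps_mono (c s t : Int) (hc : 1 ≤ c) (hct : c < t) (hts : t ≤ s) (hcs : c < s) :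
    altDoublingSteps c t ≤ altDoublingSteps c s := by
  obtain ⟨_, ht2, _⟩ := dsteps_spec c t hc hct
  obtain ⟨_, _, hs3⟩ := dsteps_spec c s hc hcs
  by_contra h
  have hle : altDoublingSteps c s ≤ altDoublingSteps c t - 1 := by omega
  have : (2:Int) ^ altDoublingSteps c s ≤ 2 ^ (altDoublingSteps c t - 1) :=
    pow_le_pow_right₀ (by norm_num) hle
  nlinarith

-- question1/the growth part: the 27-ACK loop equals the closed form
theorem grow_eq (c s : Int) (hpre : 1 ≤ c ∨ s ≤ c) (n : Nat) :
    (pvF s)^[n] c = altGrow c s n := by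
  rw [altGrow]
  by_cases hsc : s ≤ c
  · rw [if_pos hsc, iter_ge s c hsc]
  · rw [if_neg hsc]
    have hc1 : 1 ≤ c := by omega
    have hcs : c < s := by omega
    obtain ⟨hk1, hk2, hk3⟩ := dsteps_spec c s hc1 hcs
    set k := altDoublingSteps c s with hk
    by_cases hkn : k ≤ n
    · rw [if_pos hkn]
      have hsplit : n = (n - k) + 1 + (k - 1) := by omega
      rw [hsplit, Function.iterate_add_apply,
        iter_doubling s (k-1) c hc1 hk2]
      have hcap : s ≤ c * 2 ^ (k - 1) * 2 := by
        have : c * 2 ^ (k - 1) * 2 = c * 2 ^ k := by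
          rw [mul_assoc, ← pow_succ]
          congr 2
          omega
        omega
      rw [iter_cross s (c * 2 ^ (k-1)) hk2 hcap (n - k)]
      push_cast
      omega
    · rw [if_neg hkn]
      have hlt : c * 2 ^ n < s := by
        have hle : n ≤ k - 1 := by omega
        have h2 : (2:Int) ^ n ≤ 2 ^ (k - 1) := pow_le_pow_right₀ (by norm_num) hle
        nlinarith
      exact iter_doubling s n c hc1 hlt

-- the while-loop returns acks + m when the window first reaches target after m steps
theorem pvWhileA_eq (t s : Int) (m : Nat) : ∀ (c acks : Int), (1 ≤ c ∨ s ≤ c) →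
    (∀ j, j < m → (pvF s)^[j] c < t) → t ≤ (pvF s)^[m] c →
    pvWhileA t s c acks = acks + m := by
  induction m with
  | zero =>
      intro c acks _ _ hge
      simp at hge
      rw [pvWhileA]
      simp [not_lt.2 hge]
  | succ m ih =>
      intro c acks hpre hlt hge
      have hc : c < t := by have := hlt 0 (by omega); simpa using this
      rw [pvWhileA]
      rw [dif_pos hc, dif_pos hpre]
      have hstep : (if c < s then min (c * 2) s else c + 1) = pvF s c := rfl
      rw [hstep]
      have hpre' : 1 ≤ pvF s c ∨ s ≤ pvF s c := by
        rw [pvF]; split <;> omega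
      have h1 : ∀ j, j < m → (pvF s)^[j] (pvF s c) < t := by
        intro j hj
        rw [← Function.iterate_succ_apply]
        exact hlt (j + 1) (by omega)
      have h2 : t ≤ (pvF s)^[m] (pvF s c) := by
        rw [← Function.iterate_succ_apply]; exact hge
      rw [ih (pvF s c) (acks + 1) hpre' h1 h2]
      push_cast; ring

-- question2/question6: the while-loop count equals the closed form
theorem acks_eq (c s t : Int) (hpre : 1 ≤ c ∨ s ≤ c) :
    pvWhileA t s c 0 = altAcks c s t := by
  rw [altAcks]
  by_cases htc : t ≤ c
  · rw [if_pos htc, pvWhileA]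
    simp [not_lt.2 htc]
  · rw [if_neg htc]
    have hct : c < t := by omega
    by_cases hsc : s ≤ c
    · -- pure congestion avoidance: t - c steps
      rw [if_pos hsc]
      have := pvWhileA_eq t s (t - c).toNat c 0 hpre
        (fun j hj => by rw [iter_ge s c hsc]; omega)
        (by rw [iter_ge s c hsc]; omega)
      omega
    · rw [if_neg hsc]
      have hc1 : 1 ≤ c := by omega
      have hcs : c < s := by omega
      obtain ⟨hk1, hk2, hk3⟩ := dsteps_spec c s hc1 hcs
      by_cases hts : t ≤ s
      · -- target reached during slow start
        rw [if_pos hts]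
        obtain ⟨hj1, hj2, hj3⟩ := dsteps_spec c t hc1 hct
        set j := altDoublingSteps c t with hjdef
        have hjk : j ≤ altDoublingSteps c s := dsteps_mono c s t hc1 hct hts hcs
        have hlow : ∀ i, i < j → (pvF s)^[i] c < t := by
          intro i hi
          have hle : i ≤ j - 1 := by omega
          have h2 : (2:Int) ^ i ≤ 2 ^ (j - 1) := pow_le_pow_right₀ (by norm_num) hle
          have hcs2 : c * 2 ^ i < s := by nlinarith
          rw [iter_doubling s i c hc1 hcs2]
          nlinarith
        have hhigh : t ≤ (pvF s)^[j] c := by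
          by_cases hjs : c * 2 ^ j < s
          · rw [iter_doubling s j c hc1 hjs]; exact hj3
          · -- j = dsteps c s: the capped step lands exactly on s ≥ t
            have hjeq : j = altDoublingSteps c s := by
              have h2 : (2:Int) ^ (altDoublingSteps c s - 1) < 2 ^ j := by
                by_contra h
                push Not at h
                nlinarith
              have := (pow_lt_pow_iff_right₀ (a := (2:Int)) (by norm_num)).1 h2
              omega
            have hsplit : j = 0 + 1 + (j - 1) := by omega
            rw [hsplit, Function.iterate_add_apply, iter_doubling s (j-1) c hc1 (by rw [← hjeq] at hk2; exact hk2)]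
            have hcap : s ≤ c * 2 ^ (j - 1) * 2 := by
              have he : c * 2 ^ (j - 1) * 2 = c * 2 ^ j := by
                rw [mul_assoc, ← pow_succ]; congr 2; omega
              rw [← hjeq] at hk3; omega
            rw [iter_cross s (c * 2 ^ (j-1)) (by rw [← hjeq] at hk2; exact hk2) hcap 0]
            simpa using hts
        have := pvWhileA_eq t s j c 0 hpre hlow hhigh
        omega
      · -- slow start to s, then +1 to t
        rw [if_neg hts]
        set k := altDoublingSteps c s with hkdef
        set m := k + (t - s).toNat with hm
        have hval : ∀ i : Nat, i ≤ (t - s).toNat → (pvF s)^[k + i] c = s + i := by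
          intro i hi
          have hsplit : k + i = i + 1 + (k - 1) := by omega
          rw [hsplit, Function.iterate_add_apply, iter_doubling s (k-1) c hc1 hk2]
          have hcap : s ≤ c * 2 ^ (k - 1) * 2 := by
            have he : c * 2 ^ (k - 1) * 2 = c * 2 ^ k := by
              rw [mul_assoc, ← pow_succ]; congr 2; omega
            omega
          exact iter_cross s (c * 2 ^ (k-1)) hk2 hcap i
        have hlow : ∀ i, i < m → (pvF s)^[i] c < t := by
          intro i hi
          by_cases hik : i < k
          · have hle : i ≤ k - 1 := by omega
            have h2 : (2:Int) ^ i ≤ 2 ^ (k - 1) := pow_le_pow_right₀ (by norm_num) hle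
            have hcs2 : c * 2 ^ i < s := by nlinarith
            rw [iter_doubling s i c hc1 hcs2]
            omega
          · have : i = k + (i - k) := by omega
            rw [this, hval (i - k) (by omega)]
            omega
        have hhigh : t ≤ (pvF s)^[m] c := by
          rw [hm, hval (t - s).toNat le_rfl]
          omega
        have := pvWhileA_eq t s m c 0 hpre hlow hhigh
        rw [this]
        push_cast [hm]
        omega

-- question3's step function, with rwnd cap r
def pvG (s r c : Int) : Int := if c < s then min (min (c * 2) s) r else min (c + 1) r

-- from the second step on, question3 either sits at r …
theorem iterG_fixed (s r : Int) (h : 0 ≤ r ∨ s ≤ r) (n : Nat) : (pvG s r)^[n] r = r := by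
  induction n with
  | zero => rfl
  | succ n ih =>
      rw [Function.iterate_succ_apply]
      have : pvG s r r = r := by rw [pvG]; split <;> omega
      rw [this, ih]

-- … or doubles a negative window downwards
theorem iterG_neg (s r : Int) (h1 : r < 0) (h2 : r < s) (n : Nat) :
    (pvG s r)^[n] r = r * 2 ^ n := by
  induction n with
  | zero => simp
  | succ n ih =>
      rw [Function.iterate_succ_apply']
      rw [ih]
      have hle : r * 2 ^ n ≤ r := by
        have h3 : (1:Int) ≤ 2 ^ n := one_le_pow₀ (by norm_num)
        nlinarith
      have hstep : pvG s r (r * 2 ^ n) = r * 2 ^ n * 2 := by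
        rw [pvG]
        have : r * 2 ^ n < s := by omega
        simp only [if_pos this]
        omega
      rw [hstep, pow_succ]
      ring

-- the whole question3 loop in closed form
theorem q3_eq (s r : Int) (hr : r ≤ 52) :
    (pvG s r)^[60] (60 : Int) = if r < 0 ∧ r < s then r * 2 ^ 59 else r := by
  have hfirst : pvG s r 60 = r := by rw [pvG]; split <;> omega
  have h60 : (60 : Nat) = 59 + 1 := by norm_num
  rw [h60, Function.iterate_succ_apply, hfirst]
  by_cases hc : r < 0 ∧ r < s
  · rw [if_pos hc, iterG_neg s r hc.1 hc.2 59]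
  · rw [if_neg hc, iterG_fixed s r (by omega) 59]

-- A's question3 foldl, named so the verdict proofs can share it
theorem q3_fold_eq (s r : Int) :
    (List.range 60).foldl
      (fun cwnd _ => if cwnd < s then min (min (cwnd * 2) s) (min 52 r) else min (cwnd + 1) (min 52 r)) (60:Int)
      = if min 52 r < 0 ∧ min 52 r < s then min 52 r * 2 ^ 59 else min 52 r := by
  rw [show (fun (cwnd : Int) (_ : Nat) => if cwnd < s then min (min (cwnd * 2) s) (min 52 r) else min (cwnd + 1) (min 52 r))
        = (fun a _ => pvG s (min 52 r) a) from rfl,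
    foldl_const_iterate (pvG s (min 52 r)), List.length_range]
  exact q3_eq s (min 52 r) (by omega)

-- ===== VERDICT (by name: the statements are the Claim_ definitions above) =====
theorem tcp_window_size_calculator_spec : Claim_unchanged_tcp_window_size_calculator := by
  intro s c r _ hpre hnd
  unfold tcp_window_size_calculator tcp_window_size_calculator_alt
  have hpre' : 1 ≤ c ∨ s ≤ c := hpre
  have e1 : (List.range 27).foldl (fun cwnd _ => if cwnd < s then min (cwnd * 2) s else cwnd + 1) c
      = altGrow c s 27 := by
    rw [show (fun (cwnd : Int) (_ : Nat) => if cwnd < s then min (cwnd * 2) s else cwnd + 1)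
          = (fun a _ => pvF s a) from rfl,
      foldl_const_iterate (pvF s), List.length_range]
    exact grow_eq c s hpre' 27
  have e2 : pvWhileA 53 s c 0 = altAcks c s 53 := acks_eq c s 53 hpre'
  have hnd' : ¬ (r < 0 ∧ r < s) := hnd
  have e3 : (List.range 60).foldl
      (fun cwnd _ => if cwnd < s then min (min (cwnd * 2) s) (min 52 r) else min (cwnd + 1) (min 52 r)) (60:Int)
      = min 52 r := by
    rw [q3_fold_eq s r, if_neg (by omega)]
  have e6 : pvWhileA 60 (PySem.Int.floordiv 60 2) 1 0 = altAcks 1 30 60 := by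
    rw [show PySem.Int.floordiv 60 2 = 30 from by decide]
    exact acks_eq 1 30 60 (by omega)
  simp only [e1, e2, e3, e6]

set_option maxRecDepth 100000 in
theorem tcp_window_size_calculator_changed : Claim_changed_tcp_window_size_calculator := by
  unfold Claim_changed_tcp_window_size_calculator
  refine ⟨by decide, by decide, by decide, ?_, by decide, by decide⟩
  show tcp_window_size_calculator 44 10 (-1) = _
  unfold tcp_window_size_calculator
  simp only [q3_fold_eq 44 (-1)]
  rw [show PySem.Int.floordiv 60 2 = 30 from by decide,
    acks_eq 10 44 53 (by omega), acks_eq 1 30 60 (by omega)]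
  decide

theorem tcp_window_size_calculator_tight : Claim_exact_tcp_window_size_calculator := by
  intro s c r _ _ hd heq
  have hd' : r < 0 ∧ r < s := hd
  unfold tcp_window_size_calculator tcp_window_size_calculator_alt at heq
  simp only [q3_fold_eq s r] at heq
  rw [if_pos (by omega)] at heq
  have h3 := congrArg (fun l => l[2]?) heq
  simp at h3
  have hm : min 52 r = r := by omega
  rw [hm] at h3
  omega
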